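-- pv_equiv track=rewrite | github.com/mortyc126-debug/SHA | alg_attack/scf_carleman_eigen.py | exp2_nilpotency
-- ===== SOURCE A (Python) =====
-- def mat_mul_gf2(A, B):
--     """Multiply two GF(2) matrices."""
--     n = len(A)
--     m = len(B[0])
--     k = len(B)
--     C = [[0]*m for _ in range(n)]
--     for i in range(n):
--         for j in range(m):
--             val = 0
--             for l in range(k):
--                 val ^= A[i][l] & B[l][j]
--             C[i][j] = val
--     return C
--
-- def mat_add_gf2(A, B):
--     return [[A[i][j] ^ B[i][j] for j in range(len(A[0]))] for i in range(len(A))]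
--
-- def gf2_rank(mat):
--     m = [list(r) for r in mat]
--     nr, nc = len(m), len(m[0]) if m else 0
--     rank = 0
--     for col in range(nc):
--         pv = -1
--         for r in range(rank, nr):
--             if m[r][col]: pv = r; break
--         if pv == -1: continue
--         m[rank], m[pv] = m[pv], m[rank]
--         for r in range(nr):
--             if r != rank and m[r][col]:
--                 for c in range(nc): m[r][c] ^= m[rank][c]
--         rank += 1
--     return rank
--
-- def exp2_nilpotency(A):
--     n = len(A)
--     I = [[1 if i==j else 0 for j in range(n)] for i in range(n)]
--     N = mat_add_gf2(A, I)  # A - I = A + I over GF(2)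
--
--     power = [list(row) for row in N]
--     for k in range(1, n+1):
--         r = gf2_rank(power)
--         if r == 0:
--             return k, True  # (A-I)^k = 0 → nilpotent!
--         power = mat_mul_gf2(power, N)
--
--     return n, False  # Not nilpotent within n steps
-- ===== SOURCE B (Python) =====
-- def exp2_nilpotency(A):
--     """Smallest k in 1..n with (A+I)^k = 0 over bitwise GF(2): binary-search the
--     nilpotency index (the zero-power predicate is monotone), testing each
--     candidate with square-and-multiply matrix powering."""
--     n = len(A)
--     if n == 0:
--         return 0, False  # not nilpotent within 0 steps
--     N = [[A[i][j] ^ (1 if i == j else 0) for j in range(n)] for i in range(n)]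
--
--     def mul(X, Y):
--         return [[_dot(row, Y, j, n) for j in range(n)] for row in X]
--
--     def _dot(row, Y, j, n):
--         acc = 0
--         for l in range(n):
--             acc ^= row[l] & Y[l][j]
--         return acc
--
--     def power_is_zero(k):
--         # N^k computed by square-and-multiply (base case k == 1: the bitwise
--         # GF(2) semiring has no cheap identity matrix, so powers start at N)
--         P = _pow(k)
--         return all(v == 0 for row in P for v in row)
--
--     def _pow(k):
--         if k == 1:
--             return N
--         h = _pow(k // 2)
--         hh = mul(h, h)
--         return mul(hh, N) if k % 2 == 1 else hh
--
--     if not power_is_zero(n):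
--         return n, False
--     lo, hi = 1, n
--     while lo < hi:
--         mid = (lo + hi) // 2
--         if power_is_zero(mid):
--             hi = mid
--         else:
--             lo = mid + 1
--     return lo, True
-- ===== Notes on version B (the rewrite author's own statement) =====
-- stated objective: faster
-- what changed: A scans k = 1..n computing successive powers and running a full Gaussian-elimination rank test on each; B binary-searches the nilpotency index (the zero-power predicate is monotone), testing each candidate power by square-and-multiply and a direct all-zero entry check.
-- outside the precondition, e.g. on exp2_nilpotency([[1, 0], [0, 1], [0, 0]]): A returns (1, True), B raises IndexError
import Mathlib
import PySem

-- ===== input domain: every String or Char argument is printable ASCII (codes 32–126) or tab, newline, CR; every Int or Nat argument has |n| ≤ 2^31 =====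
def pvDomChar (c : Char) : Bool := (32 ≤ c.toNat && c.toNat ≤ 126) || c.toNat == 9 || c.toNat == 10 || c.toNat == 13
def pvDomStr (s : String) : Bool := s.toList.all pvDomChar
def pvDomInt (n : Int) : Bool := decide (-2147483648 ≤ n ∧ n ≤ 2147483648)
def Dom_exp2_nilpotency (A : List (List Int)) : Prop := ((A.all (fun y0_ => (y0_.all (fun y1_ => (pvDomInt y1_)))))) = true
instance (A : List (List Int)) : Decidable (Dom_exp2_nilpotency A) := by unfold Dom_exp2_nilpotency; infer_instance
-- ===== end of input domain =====

-- B replaces A's linear scan over matrix powers (with a full Gaussian-elimination rank test per step)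
-- by a binary search for the nilpotency index, testing each candidate power by square-and-multiply
-- and a direct all-zero check; the zero-power predicate is monotone, so the answers coincide.


-- ===== PORT A =====
-- m[i][j] with the out-of-range default 0; every port access is in range on Pre_
def entE (M : List (List Int)) (i j : Nat) : Int := (M.getD i []).getD j 0

-- mat_mul_gf2: n = len(A), m = len(B[0]), k = len(B)  (B ≠ [] wherever A's code calls it)
def matMulGf2 (A B : List (List Int)) : List (List Int) :=
  (List.range A.length).map (fun i =>
    (List.range (B.headD []).length).map (fun j =>
      (List.range B.length).foldl
        (fun val l => PySem.Int.bxor val (PySem.Int.band (entE A i l) (entE B l j))) 0))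

-- mat_add_gf2
def matAddGf2 (A B : List (List Int)) : List (List Int) :=
  (List.range A.length).map (fun i =>
    (List.range (A.headD []).length).map (fun j =>
      PySem.Int.bxor (entE A i j) (entE B i j)))

def gf2EntNZ (m : List (List Int)) (r c : Nat) : Bool := (m.getD r []).getD c 0 != 0

-- one iteration of gf2_rank's column loop, state = (m, rank)
def gf2RankStep (nr nc : Nat) (st : List (List Int) × Nat) (col : Nat) : List (List Int) × Nat :=
  match (List.range' st.2 (nr - st.2)).find? (fun r => gf2EntNZ st.1 r col) with
  | none => st
  | some pv =>
      let m1 := (st.1.set st.2 (st.1.getD pv [])).set pv (st.1.getD st.2 [])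
      let m2 := (List.range nr).map (fun r =>
        if r ≠ st.2 ∧ gf2EntNZ m1 r col = true then
          (List.range nc).map (fun c => PySem.Int.bxor (entE m1 r c) (entE m1 st.2 c))
        else m1.getD r [])
      (m2, st.2 + 1)

def gf2Rank (mat : List (List Int)) : Int :=
  let nr := mat.length
  let nc := if mat.isEmpty then 0 else (mat.headD []).length
  ((((List.range nc).foldl (gf2RankStep nr nc) (mat, 0)).2 : Nat) : Int)

-- the `for k in range(1, n+1)` loop with its early return
def exp2Loop (N : List (List Int)) (n : Nat) (power : List (List Int)) (k : Nat) : Int × Bool :=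
  if k > n then ((n : Int), false)
  else if gf2Rank power = 0 then ((k : Int), true)
  else exp2Loop N n (matMulGf2 power N) (k + 1)
termination_by n + 1 - k
decreasing_by omega

def exp2_nilpotency (A : List (List Int)) : Int × Bool :=
  let n := A.length
  let I := (List.range n).map (fun i => (List.range n).map (fun j => if i = j then (1 : Int) else 0))
  let N := matAddGf2 A I
  exp2Loop N n N 1

-- ===== PORT B =====
def dotAlt (row : List Int) (Y : List (List Int)) (j n : Nat) : Int :=
  (List.range n).foldl
    (fun acc l => PySem.Int.bxor acc (PySem.Int.band (row.getD l 0) ((Y.getD l []).getD j 0))) 0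

def matMulAlt (n : Nat) (X Y : List (List Int)) : List (List Int) :=
  X.map (fun row => (List.range n).map (fun j => dotAlt row Y j n))

-- _pow(k), k ≥ 1 at every call site; square-and-multiply with base case k = 1
def matPowAlt (n : Nat) (N : List (List Int)) (k : Nat) : List (List Int) :=
  if k ≤ 1 then N
  else
    let h := matPowAlt n N (k / 2)
    let hh := matMulAlt n h h
    if k % 2 = 1 then matMulAlt n hh N else hh
termination_by k
decreasing_by omega

def isZeroMat (P : List (List Int)) : Bool := P.all (fun row => row.all (fun v => v == 0))

def powerIsZero (n : Nat) (N : List (List Int)) (k : Nat) : Bool := isZeroMat (matPowAlt n N k)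

def bsearchAlt (n : Nat) (N : List (List Int)) (lo hi : Nat) : Nat :=
  if lo < hi then
    let mid := (lo + hi) / 2
    if powerIsZero n N mid then bsearchAlt n N lo mid else bsearchAlt n N (mid + 1) hi
  else lo
termination_by hi - lo
decreasing_by all_goals omega

def exp2_nilpotency_alt (A : List (List Int)) : Int × Bool :=
  let n := A.length
  if n = 0 then ((0 : Int), false)
  else
    let N := (List.range n).map (fun i => (List.range n).map (fun j =>
      PySem.Int.bxor ((A.getD i []).getD j 0) (if i = j then (1 : Int) else 0)))
    if powerIsZero n N n then (((bsearchAlt n N 1 n : Nat) : Int), true) else ((n : Int), false)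

-- ===== PRECONDITION & SPEC =====
-- Pre_ asks that row 0 have length exactly len(A) and every row at least len(A) (the matrix read
-- through the first len(A) columns is square): on other shapes A raises IndexError, except for
-- accidental shapes whose value depends on a truncated row width, where B raises instead.
def Pre_exp2_nilpotency (A : List (List Int)) : Prop :=
  (∀ r ∈ A, A.length ≤ r.length) ∧ (∀ r ∈ A.take 1, r.length = A.length)
instance (A : List (List Int)) : Decidable (Pre_exp2_nilpotency A) := by
  unfold Pre_exp2_nilpotency; infer_instance

def pvWitness_exp2_nilpotency : List (List Int) := [[0]]

def Spec_exp2_nilpotency (A : List (List Int)) (out : Int × Bool) : Prop := out = exp2_nilpotency_alt A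
instance (A : List (List Int)) (out : Int × Bool) : Decidable (Spec_exp2_nilpotency A out) := by unfold Spec_exp2_nilpotency; infer_instance

-- ===== CLAIM (what is proved, stated in full; the proofs are below) =====
def Claim_equal_exp2_nilpotency : Prop := ∀ (A : List (List Int)), Dom_exp2_nilpotency A → Pre_exp2_nilpotency A → Spec_exp2_nilpotency A (exp2_nilpotency A)

-- ===== LEMMAS AND PROOFS =====

-- ---- bitwise ring laws for PySem.Int.band / bxor ----
theorem sub_and_eq_ldiff (m n : Nat) : m - (m &&& n) = Nat.ldiff m n := by
  induction m using Nat.binaryRec generalizing n with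
  | zero => simp [Nat.ldiff]
  | bit b m ih =>
    induction n using Nat.binaryRec with
    | zero => simp [Nat.ldiff]
    | bit c k _ =>
      have hle : m &&& k ≤ m := Nat.and_le_left
      rw [Nat.land_bit, Nat.ldiff_bit, ← ih k]
      cases b <;> cases c <;> simp [Nat.bit, Nat.two_mul] <;> omega

theorem band_oo (m n : Nat) : PySem.Int.band (Int.ofNat m) (Int.ofNat n) = Int.ofNat (m &&& n) := by
  have h1 : (0:Int) ≤ Int.ofNat m := Int.natCast_nonneg m
  have h2 : (0:Int) ≤ Int.ofNat n := Int.natCast_nonneg n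
  simp only [PySem.Int.band, if_pos h1, if_pos h2]; rfl
theorem band_on (m n : Nat) : PySem.Int.band (Int.ofNat m) (Int.negSucc n) = Int.ofNat (Nat.ldiff m n) := by
  have h1 : (0:Int) ≤ Int.ofNat m := Int.natCast_nonneg m
  have h2 : ¬ (0:Int) ≤ Int.negSucc n := by omega
  simp only [PySem.Int.band, h2, if_false, if_pos h1]
  have h3 : (-(Int.negSucc n) - 1).toNat = n := by omega
  have h4 : (Int.ofNat m).toNat = m := rfl
  rw [h3, h4, sub_and_eq_ldiff]; rfl
theorem band_no (m n : Nat) : PySem.Int.band (Int.negSucc m) (Int.ofNat n) = Int.ofNat (Nat.ldiff n m) := by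
  have h1 : ¬ (0:Int) ≤ Int.negSucc m := by omega
  have h2 : (0:Int) ≤ Int.ofNat n := Int.natCast_nonneg n
  simp only [PySem.Int.band, h1, if_false, if_pos h2]
  have h3 : (-(Int.negSucc m) - 1).toNat = m := by omega
  have h4 : (Int.ofNat n).toNat = n := rfl
  rw [h3, h4, sub_and_eq_ldiff]; rfl
theorem band_nn (m n : Nat) : PySem.Int.band (Int.negSucc m) (Int.negSucc n) = Int.negSucc (m ||| n) := by
  have h1 : ¬ (0:Int) ≤ Int.negSucc m := by omega
  have h2 : ¬ (0:Int) ≤ Int.negSucc n := by omega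
  simp only [PySem.Int.band, h1, h2, if_false]
  have h3 : (-(Int.negSucc m) - 1).toNat = m := by omega
  have h4 : (-(Int.negSucc n) - 1).toNat = n := by omega
  rw [h3, h4]; omega
theorem bxor_oo (m n : Nat) : PySem.Int.bxor (Int.ofNat m) (Int.ofNat n) = Int.ofNat (m ^^^ n) := by
  have h1 : (0:Int) ≤ Int.ofNat m := Int.natCast_nonneg m
  have h2 : (0:Int) ≤ Int.ofNat n := Int.natCast_nonneg n
  simp only [PySem.Int.bxor, if_pos h1, if_pos h2]; rfl
theorem bxor_on (m n : Nat) : PySem.Int.bxor (Int.ofNat m) (Int.negSucc n) = Int.negSucc (m ^^^ n) := by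
  have h1 : (0:Int) ≤ Int.ofNat m := Int.natCast_nonneg m
  have h2 : ¬ (0:Int) ≤ Int.negSucc n := by omega
  simp only [PySem.Int.bxor, h2, if_false, if_pos h1]
  have h3 : (-(Int.negSucc n) - 1).toNat = n := by omega
  have h4 : (Int.ofNat m).toNat = m := rfl
  rw [h3, h4]; omega
theorem bxor_no (m n : Nat) : PySem.Int.bxor (Int.negSucc m) (Int.ofNat n) = Int.negSucc (m ^^^ n) := by
  have h1 : ¬ (0:Int) ≤ Int.negSucc m := by omega
  have h2 : (0:Int) ≤ Int.ofNat n := Int.natCast_nonneg n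
  simp only [PySem.Int.bxor, h1, if_false, if_pos h2]
  have h3 : (-(Int.negSucc m) - 1).toNat = m := by omega
  have h4 : (Int.ofNat n).toNat = n := rfl
  rw [h3, h4]; omega
theorem bxor_nn (m n : Nat) : PySem.Int.bxor (Int.negSucc m) (Int.negSucc n) = Int.ofNat (m ^^^ n) := by
  have h1 : ¬ (0:Int) ≤ Int.negSucc m := by omega
  have h2 : ¬ (0:Int) ≤ Int.negSucc n := by omega
  simp only [PySem.Int.bxor, h1, h2, if_false]
  have h3 : (-(Int.negSucc m) - 1).toNat = m := by omega
  have h4 : (-(Int.negSucc n) - 1).toNat = n := by omega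
  rw [h3, h4]; rfl

theorem bxor_assoc (a b c : Int) :
    PySem.Int.bxor (PySem.Int.bxor a b) c = PySem.Int.bxor a (PySem.Int.bxor b c) := by
  rcases a with m | m <;> rcases b with n | n <;> rcases c with k | k <;>
    simp only [bxor_oo, bxor_on, bxor_no, bxor_nn, Int.ofNat.injEq, Int.negSucc.injEq] <;>
    (apply Nat.eq_of_testBit_eq; intro i;
     simp only [Nat.testBit_xor];
     cases m.testBit i <;> cases n.testBit i <;> cases k.testBit i <;> rfl)

theorem band_assoc (a b c : Int) :
    PySem.Int.band (PySem.Int.band a b) c = PySem.Int.band a (PySem.Int.band b c) := by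
  rcases a with m | m <;> rcases b with n | n <;> rcases c with k | k <;>
    simp only [band_oo, band_on, band_no, band_nn, Int.ofNat.injEq, Int.negSucc.injEq] <;>
    (apply Nat.eq_of_testBit_eq; intro i;
     simp only [Nat.testBit_and, Nat.testBit_or, Nat.testBit_ldiff];
     cases m.testBit i <;> cases n.testBit i <;> cases k.testBit i <;> rfl)

theorem band_bxor_right (a b c : Int) :
    PySem.Int.band (PySem.Int.bxor a b) c
      = PySem.Int.bxor (PySem.Int.band a c) (PySem.Int.band b c) := by
  rcases a with m | m <;> rcases b with n | n <;> rcases c with k | k <;>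
    simp only [bxor_oo, bxor_on, bxor_no, bxor_nn, band_oo, band_on, band_no, band_nn,
      Int.ofNat.injEq, Int.negSucc.injEq] <;>
    (apply Nat.eq_of_testBit_eq; intro i;
     simp only [Nat.testBit_and, Nat.testBit_or, Nat.testBit_ldiff, Nat.testBit_xor];
     cases m.testBit i <;> cases n.testBit i <;> cases k.testBit i <;> rfl)

theorem zero_band (a : Int) : PySem.Int.band 0 a = 0 := by
  rw [PySem.Int.band_comm]; exact PySem.Int.band_zero a

-- ---- xor-fold over a range ----
def Fx (n : Nat) (f : Nat → Int) : Int :=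
  (List.range n).foldl (fun a l => PySem.Int.bxor a (f l)) 0

theorem Fx_succ (n : Nat) (f : Nat → Int) :
    Fx (n + 1) f = PySem.Int.bxor (Fx n f) (f n) := by
  simp [Fx, List.range_succ]

theorem Fx_congr {n : Nat} {f g : Nat → Int} (h : ∀ l < n, f l = g l) : Fx n f = Fx n g := by
  induction n with
  | zero => rfl
  | succ n ih =>
    rw [Fx_succ, Fx_succ, ih (fun l hl => h l (by omega)), h n (by omega)]

theorem Fx_zero_fn (n : Nat) : Fx n (fun _ => 0) = 0 := by
  induction n with
  | zero => rfl
  | succ n ih => rw [Fx_succ, ih]; exact PySem.Int.bxor_zero 0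

theorem Fx_split (n : Nat) (f g : Nat → Int) :
    Fx n (fun l => PySem.Int.bxor (f l) (g l)) = PySem.Int.bxor (Fx n f) (Fx n g) := by
  induction n with
  | zero => simp [Fx]
  | succ n ih =>
    rw [Fx_succ, Fx_succ, Fx_succ, ih]
    rw [bxor_assoc, bxor_assoc]
    rw [PySem.Int.bxor_comm (f n) (PySem.Int.bxor (Fx n g) (g n))]
    rw [bxor_assoc, PySem.Int.bxor_comm (g n) (f n)]

theorem Fx_band_right (n : Nat) (f : Nat → Int) (c : Int) :
    PySem.Int.band (Fx n f) c = Fx n (fun l => PySem.Int.band (f l) c) := by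
  induction n with
  | zero => simp [Fx, zero_band]
  | succ n ih => rw [Fx_succ, Fx_succ, band_bxor_right, ih]

theorem Fx_band_left (n : Nat) (f : Nat → Int) (c : Int) :
    PySem.Int.band c (Fx n f) = Fx n (fun l => PySem.Int.band c (f l)) := by
  rw [PySem.Int.band_comm, Fx_band_right]
  exact Fx_congr (fun l _ => PySem.Int.band_comm (f l) c)

theorem Fx_swap (n m : Nat) (g : Nat → Nat → Int) :
    Fx n (fun l => Fx m (fun p => g l p)) = Fx m (fun p => Fx n (fun l => g l p)) := by
  induction n with
  | zero =>
    simp only [Fx]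
    exact (Fx_zero_fn m).symm
  | succ n ih =>
    rw [Fx_succ, ih, ← Fx_split]
    exact Fx_congr (fun p _ => (Fx_succ n (fun l => g l p)).symm)

-- ---- matrix shapes, entries, extensionality ----
def SqM (n : Nat) (M : List (List Int)) : Prop := M.length = n ∧ ∀ r ∈ M, r.length = n

theorem headD_len {n : Nat} {M : List (List Int)} (h : SqM n M) (hn : 0 < n) :
    (M.headD []).length = n := by
  rcases M with _ | ⟨r, M⟩
  · exact absurd h.1 (by simp; omega)
  · exact h.2 r (List.mem_cons_self)

theorem entE_eq_getElem {M : List (List Int)} {i j : Nat} (hi : i < M.length)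
    (hj : j < M[i].length) : entE M i j = M[i][j] := by
  unfold entE
  rw [List.getD_eq_getElem M [] hi, List.getD_eq_getElem _ 0 hj]

theorem sq_ext {n : Nat} {X Y : List (List Int)} (hX : SqM n X) (hY : SqM n Y)
    (h : ∀ i < n, ∀ j < n, entE X i j = entE Y i j) : X = Y := by
  apply List.ext_getElem (by rw [hX.1, hY.1])
  intro i hi hi'
  have hin : i < n := hX.1 ▸ hi
  have hrX : X[i].length = n := hX.2 _ (List.getElem_mem hi)
  have hrY : Y[i].length = n := hY.2 _ (List.getElem_mem hi')
  apply List.ext_getElem (by rw [hrX, hrY])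
  intro j hj hj'
  have hjn : j < n := hrX ▸ hj
  have := h i hin j hjn
  rwa [entE_eq_getElem hi hj, entE_eq_getElem hi' hj'] at this

theorem entE_matMul {n : Nat} {X Y : List (List Int)} (hX : SqM n X) (hY : SqM n Y)
    {i j : Nat} (hi : i < n) (hj : j < n) :
    entE (matMulGf2 X Y) i j = Fx n (fun l => PySem.Int.band (entE X i l) (entE Y l j)) := by
  have hn : 0 < n := by omega
  have hh : (Y.headD []).length = n := headD_len hY hn
  unfold matMulGf2 entE
  rw [PySem.List.getD_map_range _ _ _ _ (hX.1 ▸ hi), hh,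
      PySem.List.getD_map_range _ _ _ _ hj, hY.1]
  rfl

theorem matMul_sq {n : Nat} {X Y : List (List Int)} (hX : SqM n X) (hY : SqM n Y) :
    SqM n (matMulGf2 X Y) := by
  constructor
  · simp [matMulGf2, hX.1]
  · intro r hr
    unfold matMulGf2 at hr
    simp only [List.mem_map, List.mem_range] at hr
    obtain ⟨i, hi, rfl⟩ := hr
    have hin : i < n := hX.1 ▸ hi
    rw [List.length_map, List.length_range]
    exact headD_len hY (by omega)

theorem matMul_assoc {n : Nat} {X Y Z : List (List Int)}
    (hX : SqM n X) (hY : SqM n Y) (hZ : SqM n Z) :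
    matMulGf2 (matMulGf2 X Y) Z = matMulGf2 X (matMulGf2 Y Z) := by
  apply sq_ext (matMul_sq (matMul_sq hX hY) hZ) (matMul_sq hX (matMul_sq hY hZ))
  intro i hi j hj
  rw [entE_matMul (matMul_sq hX hY) hZ hi hj, entE_matMul hX (matMul_sq hY hZ) hi hj]
  have lhs_eq : Fx n (fun l => PySem.Int.band (entE (matMulGf2 X Y) i l) (entE Z l j))
      = Fx n (fun p => Fx n (fun l => PySem.Int.band (entE X i p)
          (PySem.Int.band (entE Y p l) (entE Z l j)))) := by
    rw [← Fx_swap]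
    apply Fx_congr; intro l hl
    rw [entE_matMul hX hY hi hl, Fx_band_right]
    apply Fx_congr; intro p _
    exact band_assoc _ _ _
  rw [lhs_eq]
  apply Fx_congr; intro p hp
  rw [← Fx_band_left]
  congr 1
  exact (entE_matMul hY hZ hp hj).symm

-- ---- B's multiplication and powers coincide with A's ----
theorem matMulAlt_eq {n : Nat} {X Y : List (List Int)} (hX : SqM n X) (hY : SqM n Y) :
    matMulAlt n X Y = matMulGf2 X Y := by
  have hsq : SqM n (matMulAlt n X Y) := by
    constructor
    · simp [matMulAlt, hX.1]
    · intro r hr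
      simp only [matMulAlt, List.mem_map] at hr
      obtain ⟨row, _, rfl⟩ := hr
      simp
  apply sq_ext hsq (matMul_sq hX hY)
  intro i hi j hj
  rw [entE_matMul hX hY hi hj]
  have hiX : i < X.length := hX.1 ▸ hi
  unfold matMulAlt entE
  rw [List.getD_eq_getElem _ [] (by simpa using hiX), List.getElem_map,
      PySem.List.getD_map_range _ _ _ _ hj]
  show dotAlt X[i] Y j n = _
  unfold dotAlt Fx
  have hfun : (fun (acc : Int) l => PySem.Int.bxor acc
        (PySem.Int.band (X[i].getD l 0) ((Y.getD l []).getD j 0)))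
      = (fun (a : Int) l => PySem.Int.bxor a
        (PySem.Int.band (entE X i l) (entE Y l j))) := by
    funext a l
    unfold entE
    rw [List.getD_eq_getElem X [] hiX]
  rw [hfun]
  simp only [entE]

def pwA (N : List (List Int)) : Nat → List (List Int)
  | 0 => N
  | k + 1 => matMulGf2 (pwA N k) N

theorem pwA_sq {n : Nat} {N : List (List Int)} (hN : SqM n N) (k : Nat) : SqM n (pwA N k) := by
  induction k with
  | zero => exact hN
  | succ k ih => exact matMul_sq ih hN

theorem pwA_add {n : Nat} {N : List (List Int)} (hN : SqM n N) (a b : Nat) :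
    matMulGf2 (pwA N a) (pwA N b) = pwA N (a + b + 1) := by
  induction b with
  | zero => rfl
  | succ b ih =>
    show matMulGf2 (pwA N a) (matMulGf2 (pwA N b) N) = _
    rw [← matMul_assoc (pwA_sq hN a) (pwA_sq hN b) hN, ih]
    rfl

theorem matPowAlt_eq {n : Nat} {N : List (List Int)} (hN : SqM n N) :
    ∀ k, 1 ≤ k → matPowAlt n N k = pwA N (k - 1) := by
  intro k
  induction k using Nat.strong_induction_on with
  | _ k ih =>
    intro hk
    rw [matPowAlt]
    by_cases h1 : k ≤ 1
    · have hk1 : k = 1 := by omega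
      rw [if_pos h1, hk1]
      rfl
    · have hk2 : 2 ≤ k := by omega
      have he1 : 1 ≤ k / 2 := by omega
      have helt : k / 2 < k := by omega
      simp only [if_neg h1]
      rw [ih (k / 2) helt he1,
          matMulAlt_eq (pwA_sq hN _) (pwA_sq hN _), pwA_add hN]
      by_cases ho : k % 2 = 1
      · rw [if_pos ho, matMulAlt_eq (pwA_sq hN _) hN]
        have hstep : matMulGf2 (pwA N (k / 2 - 1 + (k / 2 - 1) + 1)) N
            = pwA N (k / 2 - 1 + (k / 2 - 1) + 1 + 1) := rfl
        rw [hstep]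
        congr 1
        omega
      · rw [if_neg ho]
        congr 1
        omega

-- ---- the zero-matrix predicate ----
theorem isZeroMat_iff {n : Nat} {M : List (List Int)} (h : SqM n M) :
    isZeroMat M = true ↔ ∀ i < n, ∀ j < n, entE M i j = 0 := by
  unfold isZeroMat
  simp only [List.all_eq_true, beq_iff_eq]
  constructor
  · intro hz i hi j hj
    have hiM : i < M.length := h.1 ▸ hi
    have hjM : j < M[i].length := (h.2 _ (List.getElem_mem hiM)) ▸ hj
    rw [entE_eq_getElem hiM hjM]
    exact hz _ (List.getElem_mem hiM) _ (List.getElem_mem hjM)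
  · intro hz row hrow v hv
    obtain ⟨i, hi, rfl⟩ := List.mem_iff_getElem.mp hrow
    obtain ⟨j, hj, rfl⟩ := List.mem_iff_getElem.mp hv
    have := hz i (h.1 ▸ hi) j ((h.2 _ (List.getElem_mem hi)) ▸ hj)
    rwa [entE_eq_getElem hi hj] at this

theorem pwA_zero_step {n : Nat} {N : List (List Int)} (hN : SqM n N) (k : Nat)
    (hz : isZeroMat (pwA N k) = true) : isZeroMat (pwA N (k + 1)) = true := by
  rw [isZeroMat_iff (pwA_sq hN (k + 1))]
  rw [isZeroMat_iff (pwA_sq hN k)] at hz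
  intro i hi j hj
  show entE (matMulGf2 (pwA N k) N) i j = 0
  rw [entE_matMul (pwA_sq hN k) hN hi hj]
  rw [Fx_congr (g := fun _ => (0 : Int)) (fun l hl => by rw [hz i hi l hl]; exact zero_band _)]
  exact Fx_zero_fn n

theorem pwA_zero_mono {n : Nat} {N : List (List Int)} (hN : SqM n N) {k j : Nat}
    (hkj : k ≤ j) (hz : isZeroMat (pwA N k) = true) : isZeroMat (pwA N j) = true := by
  induction j with
  | zero => exact (Nat.le_zero.mp hkj) ▸ hz
  | succ j ih =>
    rcases Nat.lt_or_ge k (j + 1) with h | h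
    · exact pwA_zero_step hN j (ih (by omega))
    · have : k = j + 1 := by omega
      exact this ▸ hz

-- ---- gf2Rank is 0 exactly on the zero matrix ----
theorem gf2RankStep_rank_mono (nr nc : Nat) (st : List (List Int) × Nat) (col : Nat) :
    st.2 ≤ (gf2RankStep nr nc st col).2 := by
  unfold gf2RankStep
  cases h : (List.range' st.2 (nr - st.2)).find? (fun r => gf2EntNZ st.1 r col) <;> simp

theorem gf2Rank_foldl_mono (nr nc : Nat) (L : List Nat) (st : List (List Int) × Nat) :
    st.2 ≤ (L.foldl (gf2RankStep nr nc) st).2 := by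
  induction L generalizing st with
  | nil => exact Nat.le_refl _
  | cons c L ih => exact (gf2RankStep_rank_mono nr nc st c).trans (ih _)

theorem gf2Rank_foldl_pos (nr nc : Nat) (P : List (List Int)) (c : Nat)
    (hw : ∃ r < nr, gf2EntNZ P r c = true) :
    ∀ (L : List Nat) (st : List (List Int) × Nat),
      (st = (P, 0) ∨ 1 ≤ st.2) → c ∈ L → 1 ≤ (L.foldl (gf2RankStep nr nc) st).2 := by
  intro L
  induction L with
  | nil => intro st _ hc; exact absurd hc (List.not_mem_nil)
  | cons col L ih =>
    intro st hst hc
    rcases hst with rfl | hpos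
    · by_cases hfind : ((List.range' (0:Nat) (nr - 0)).find? (fun r => gf2EntNZ P r col)).isSome
      · refine Nat.le_trans ?_ (gf2Rank_foldl_mono nr nc L _)
        show 1 ≤ (gf2RankStep nr nc (P, 0) col).2
        unfold gf2RankStep
        obtain ⟨pv, hpv⟩ := Option.isSome_iff_exists.mp hfind
        rw [hpv]
      · rcases List.mem_cons.mp hc with rfl | hcL
        · exfalso
          obtain ⟨r, hr, hrz⟩ := hw
          rw [Option.not_isSome_iff_eq_none, List.find?_eq_none] at hfind
          exact absurd hrz (by simpa using hfind r (by simp [List.mem_range']; omega))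
        · have hstep : gf2RankStep nr nc (P, 0) col = (P, 0) := by
            unfold gf2RankStep
            rw [Option.not_isSome_iff_eq_none] at hfind
            rw [hfind]
          rw [List.foldl_cons, hstep]
          exact ih _ (Or.inl rfl) hcL
    · rw [List.foldl_cons]
      exact Nat.le_trans (Nat.le_trans hpos (gf2RankStep_rank_mono nr nc st col))
        (gf2Rank_foldl_mono nr nc L _)

theorem gf2Rank_foldl_zero (nr nc : Nat) (P : List (List Int))
    (hz : ∀ r < nr, ∀ c < nc, gf2EntNZ P r c = false) (L : List Nat)
    (hL : ∀ c ∈ L, c < nc) :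
    L.foldl (gf2RankStep nr nc) (P, 0) = (P, 0) := by
  induction L with
  | nil => rfl
  | cons col L ih =>
    have hstep : gf2RankStep nr nc (P, 0) col = (P, 0) := by
      unfold gf2RankStep
      have : (List.range' (0:Nat) (nr - 0)).find? (fun r => gf2EntNZ P r col) = none := by
        rw [List.find?_eq_none]
        intro r hr
        simp only [List.mem_range'] at hr
        simp [hz r (by omega) col (hL col (List.mem_cons_self))]
      rw [this]
    rw [List.foldl_cons, hstep]
    exact ih (fun c hc => hL c (List.mem_cons_of_mem _ hc))

theorem gf2Rank_zero_iff {n : Nat} {P : List (List Int)} (h : SqM n P) :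
    gf2Rank P = 0 ↔ isZeroMat P = true := by
  unfold gf2Rank
  rcases Nat.eq_zero_or_pos n with hn | hn
  · have hPnil : P = [] := List.length_eq_zero_iff.mp (h.1.trans hn)
    subst hPnil
    simp [isZeroMat]
  · have hne : ¬ P.isEmpty := by
      simp [List.isEmpty_iff, ← List.length_eq_zero_iff, h.1]; omega
    have hPe : P.isEmpty = false := by
      rcases P with _ | _ <;> simp_all [SqM]
    simp only [hPe, Bool.false_eq_true, if_false, h.1, headD_len h hn]
    constructor
    · intro hr
      rw [isZeroMat_iff h]
      by_contra hnz
      push_neg at hnz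
      obtain ⟨i, hi, j, hj, hij⟩ := hnz
      have : 1 ≤ ((List.range n).foldl (gf2RankStep n n) (P, 0)).2 := by
        apply gf2Rank_foldl_pos n n P j ⟨i, hi, by simp [gf2EntNZ, entE] at hij ⊢; exact hij⟩
        · exact Or.inl rfl
        · exact List.mem_range.mpr hj
      omega
    · intro hz
      rw [isZeroMat_iff h] at hz
      rw [gf2Rank_foldl_zero n n P
        (fun r hr c hc => by simp [gf2EntNZ]; simpa [entE] using hz r hr c hc)
        (List.range n) (fun c hc => List.mem_range.mp hc)]
      rfl

-- ---- A's scan and B's binary search both return the least zero power ----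
theorem exp2Loop_none {n : Nat} {N : List (List Int)} (hN : SqM n N) :
    ∀ d k, 1 ≤ k → n + 1 - k = d →
      (∀ j, k ≤ j → j ≤ n → isZeroMat (pwA N (j - 1)) = false) →
      exp2Loop N n (pwA N (k - 1)) k = ((n : Int), false) := by
  intro d
  induction d with
  | zero =>
    intro k hk1 hd _
    rw [exp2Loop, if_pos (by omega : k > n)]
  | succ d ih =>
    intro k hk1 hd hall
    have hkn : k ≤ n := by omega
    rw [exp2Loop, if_neg (by omega : ¬ k > n)]
    have hzf : isZeroMat (pwA N (k - 1)) = false := hall k (Nat.le_refl k) hkn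
    have hr : ¬ gf2Rank (pwA N (k - 1)) = 0 := by
      rw [gf2Rank_zero_iff (pwA_sq hN _)]
      simp [hzf]
    rw [if_neg hr]
    have hstep : matMulGf2 (pwA N (k - 1)) N = pwA N ((k + 1) - 1) := by
      have : matMulGf2 (pwA N (k - 1)) N = pwA N (k - 1 + 1) := rfl
      rw [this]
      congr 1
      omega
    rw [hstep]
    exact ih (k + 1) (by omega) (by omega) (fun j hj hjn => hall j (by omega) hjn)

theorem exp2Loop_found {n : Nat} {N : List (List Int)} (hN : SqM n N) (k₀ : Nat)
    (hk₀ : 1 ≤ k₀) (hk₀n : k₀ ≤ n) (hz : isZeroMat (pwA N (k₀ - 1)) = true)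
    (hmin : ∀ j, 1 ≤ j → j < k₀ → isZeroMat (pwA N (j - 1)) = false) :
    ∀ d k, 1 ≤ k → k₀ - k = d → k ≤ k₀ →
      exp2Loop N n (pwA N (k - 1)) k = ((k₀ : Int), true) := by
  intro d
  induction d with
  | zero =>
    intro k hk1 hd hkk
    have hkeq : k = k₀ := by omega
    subst hkeq
    rw [exp2Loop, if_neg (by omega : ¬ k > n)]
    have hr : gf2Rank (pwA N (k - 1)) = 0 := by
      rw [gf2Rank_zero_iff (pwA_sq hN _)]
      exact hz
    rw [if_pos hr]
  | succ d ih =>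
    intro k hk1 hd hkk
    have hklt : k < k₀ := by omega
    rw [exp2Loop, if_neg (by omega : ¬ k > n)]
    have hr : ¬ gf2Rank (pwA N (k - 1)) = 0 := by
      rw [gf2Rank_zero_iff (pwA_sq hN _)]
      simp [hmin k hk1 hklt]
    rw [if_neg hr]
    have hstep : matMulGf2 (pwA N (k - 1)) N = pwA N ((k + 1) - 1) := by
      have : matMulGf2 (pwA N (k - 1)) N = pwA N (k - 1 + 1) := rfl
      rw [this]
      congr 1
      omega
    rw [hstep]
    exact ih (k + 1) (by omega) (by omega) (by omega)

theorem bsearchAlt_eq {n : Nat} {N : List (List Int)} (hN : SqM n N) (k₀ : Nat)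
    (hk₀ : 1 ≤ k₀) (hz : isZeroMat (pwA N (k₀ - 1)) = true)
    (hmin : ∀ j, 1 ≤ j → j < k₀ → isZeroMat (pwA N (j - 1)) = false) :
    ∀ d lo hi, hi - lo = d → 1 ≤ lo → lo ≤ k₀ → k₀ ≤ hi → bsearchAlt n N lo hi = k₀ := by
  intro d
  induction d using Nat.strong_induction_on with
  | _ d ih =>
    intro lo hi hd hlo1 hlok hkhi
    by_cases hlt : lo < hi
    · rw [bsearchAlt, if_pos hlt]
      have hmid1 : lo ≤ (lo + hi) / 2 := by omega
      have hmid2 : (lo + hi) / 2 < hi := by omega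
      have hmz : powerIsZero n N ((lo + hi) / 2)
          = isZeroMat (pwA N ((lo + hi) / 2 - 1)) := by
        unfold powerIsZero
        rw [matPowAlt_eq hN _ (by omega)]
      by_cases hzm : powerIsZero n N ((lo + hi) / 2) = true
      · rw [if_pos hzm]
        have hk₀mid : k₀ ≤ (lo + hi) / 2 := by
          by_contra hc
          have := hmin ((lo + hi) / 2) (by omega) (by omega)
          rw [hmz] at hzm
          rw [hzm] at this
          exact absurd this (by simp)
        exact ih ((lo + hi) / 2 - lo) (by omega) lo _ rfl hlo1 hlok hk₀mid
      · rw [if_neg hzm]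
        have hmidk : (lo + hi) / 2 < k₀ := by
          by_contra hc
          have : isZeroMat (pwA N ((lo + hi) / 2 - 1)) = true :=
            pwA_zero_mono hN (by omega) hz
          rw [← hmz] at this
          exact hzm this
        exact ih (hi - ((lo + hi) / 2 + 1)) (by omega) _ hi rfl (by omega) (by omega) hkhi
    · rw [bsearchAlt, if_neg hlt]
      omega

-- ---- the two ports compute the same matrix N = A + I ----
theorem preHead_len {A : List (List Int)} (hPre : Pre_exp2_nilpotency A)
    (hn : 0 < A.length) : (A.headD []).length = A.length := by
  rcases A with _ | ⟨r, rest⟩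
  · simp at hn
  · exact hPre.2 r (by simp)

theorem matAdd_eq_altN {A : List (List Int)} (hPre : Pre_exp2_nilpotency A) :
    matAddGf2 A ((List.range A.length).map (fun i =>
        (List.range A.length).map (fun j => if i = j then (1 : Int) else 0)))
      = (List.range A.length).map (fun i => (List.range A.length).map (fun j =>
          PySem.Int.bxor ((A.getD i []).getD j 0) (if i = j then (1 : Int) else 0))) := by
  unfold matAddGf2
  apply List.map_congr_left
  intro i hi
  have hin : i < A.length := List.mem_range.mp hi
  have hh : (A.headD []).length = A.length := preHead_len hPre (by omega)
  rw [hh]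
  apply List.map_congr_left
  intro j hj
  have hjn : j < A.length := List.mem_range.mp hj
  have hI : entE ((List.range A.length).map (fun i =>
      (List.range A.length).map (fun j => if i = j then (1 : Int) else 0))) i j
      = (if i = j then (1 : Int) else 0) := by
    unfold entE
    rw [PySem.List.getD_map_range _ _ _ _ hin, PySem.List.getD_map_range _ _ _ _ hjn]
  rw [hI]
  rfl

theorem altN_sq (A : List (List Int)) :
    SqM A.length ((List.range A.length).map (fun i => (List.range A.length).map (fun j =>
      PySem.Int.bxor ((A.getD i []).getD j 0) (if i = j then (1 : Int) else 0)))) := by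
  constructor
  · simp
  · intro r hr
    simp only [List.mem_map] at hr
    obtain ⟨i, _, rfl⟩ := hr
    simp

-- ===== VERDICT (by name: the statement is the Claim_ definition above) =====
theorem exp2_nilpotency_spec : Claim_equal_exp2_nilpotency := by
  intro A _ hPre
  unfold Spec_exp2_nilpotency exp2_nilpotency exp2_nilpotency_alt
  simp only []
  rw [matAdd_eq_altN hPre]
  set n := A.length with hn
  set N := (List.range n).map (fun i => (List.range n).map (fun j =>
      PySem.Int.bxor ((A.getD i []).getD j 0) (if i = j then (1 : Int) else 0))) with hNdef
  have hNsq : SqM n N := altN_sq A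
  rcases Nat.eq_zero_or_pos n with h0 | hpos
  · rw [if_pos h0, exp2Loop, if_pos (by omega : 1 > n), h0]
    rfl
  · rw [if_neg (by omega : ¬ n = 0)]
    by_cases hex : ∃ k, 1 ≤ k ∧ k ≤ n ∧ isZeroMat (pwA N (k - 1)) = true
    · have hQdec : DecidablePred (fun k => 1 ≤ k ∧ k ≤ n ∧ isZeroMat (pwA N (k - 1)) = true) :=
        fun k => by infer_instance
      obtain ⟨hk₀1, hk₀n, hk₀z⟩ := Nat.find_spec hex
      have hmin : ∀ j, 1 ≤ j → j < Nat.find hex → isZeroMat (pwA N (j - 1)) = false := by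
        intro j hj1 hjlt
        have := Nat.find_min hex hjlt
        simp only [not_and_or] at this
        rcases this with h | h | h
        · omega
        · omega
        · exact Bool.not_eq_true _ ▸ (by simpa using h)
      have hzn : powerIsZero n N n = true := by
        unfold powerIsZero
        rw [matPowAlt_eq hNsq n (by omega)]
        exact pwA_zero_mono hNsq (by omega) hk₀z
      rw [if_pos hzn]
      have hA := exp2Loop_found hNsq (Nat.find hex) hk₀1 hk₀n hk₀z hmin
        (Nat.find hex - 1) 1 (Nat.le_refl 1) rfl hk₀1
      have hB := bsearchAlt_eq hNsq (Nat.find hex) hk₀1 hk₀z hmin (n - 1) 1 n rfl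
        (Nat.le_refl 1) hk₀1 hk₀n
      rw [hB]
      exact hA
    · push_neg at hex
      have hall : ∀ j, 1 ≤ j → j ≤ n → isZeroMat (pwA N (j - 1)) = false := by
        intro j hj1 hjn
        have := hex j hj1 hjn
        simpa using this
      have hzn : ¬ powerIsZero n N n = true := by
        unfold powerIsZero
        rw [matPowAlt_eq hNsq n (by omega)]
        simp [hall n (by omega) (Nat.le_refl n)]
      rw [if_neg hzn]
      exact exp2Loop_none hNsq n 1 (Nat.le_refl 1) (by omega) hall
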